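-- pv_equiv track=rewrite | github.com/JackSloaner/CEServerBot | functions.py | getAllNumberConfigs
-- ===== SOURCE A (Python) =====
-- def nextConfig(lastConfig):
--   reverse = lastConfig.copy()
--   reverse.reverse()
--   loopIndex = 1
--   while reverse[loopIndex] == 1:
--     loopIndex += 1
--   while reverse[loopIndex] == 0:
--     loopIndex += 1
--   realIndex = len(lastConfig) - loopIndex - 1
--   newConfig = lastConfig[0:realIndex]
--   newConfig.append(0)
--   ones = lastConfig.count(1) - newConfig.count(1)
--   for x in range(ones):
--     newConfig.append(1)
--   rest = len(lastConfig) - len(newConfig)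
--   for x in range(rest):
--     newConfig.append(0)
--
--   return newConfig
--
-- def lastOne(config):
--   latest = 0
--   i = 0
--   for x in config:
--     if x == 1:
--       latest = i
--     i += 1
--   return latest
--
-- def findConfigs(startConfig, final):
--   if startConfig == final:
--     return [startConfig.copy()]
--   cfList = []
--   while startConfig != final:
--     cfList.append(startConfig.copy())
--     lastPos = lastOne(startConfig)
--     while startConfig[-1] == 0:
--       startConfig[lastPos] = 0
--       startConfig[lastPos + 1] = 1
--       lastPos += 1
--       cfList.append(startConfig.copy())
--     if startConfig != final:
--       startConfig = nextConfig(startConfig)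
--       if startConfig == final:
--         cfList.append(startConfig)
--
--   return cfList
--
-- def getAllNumberConfigs(length):
--   ones = 0
--   totalConfigs = []
--   for starts in range(length + 1):
--     config = []
--     final = []
--     for x in range(ones):
--       config.append(1)
--     for x in range(length - ones):
--       config.append(0)
--       final.append(0)
--     for x in range(ones):
--       final.append(1)
--     set1 = findConfigs(config, final)
--     totalConfigs.extend(set1)
--     ones += 1
--   return totalConfigs
-- ===== SOURCE B (Python) =====
-- def _combos(items, k):
--     # all k-element combinations of items, in lexicographic (itertools) order
--     if k == 0:
--         return [()]
--     if not items:
--         return []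
--     first, rest = items[0], items[1:]
--     with_first = [(first,) + c for c in _combos(rest, k - 1)]
--     return with_first + _combos(rest, k)
--
--
-- def getAllNumberConfigs(length):
--     total = []
--     for ones in range(length + 1):
--         for pos in _combos(list(range(length)), ones):
--             total.append([1 if i in pos else 0 for i in range(length)])
--     return total
-- ===== Notes on version B (the rewrite author's own statement) =====
-- stated objective: simpler
-- what changed: Replaces A's stateful next-configuration machinery (reversed-scan successor computation, last-one sliding loops and in-place list mutation) with a direct recursive combination generator: for each popcount, enumerate the one-position tuples in lexicographic order and build each config by membership.
import Mathlib
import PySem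

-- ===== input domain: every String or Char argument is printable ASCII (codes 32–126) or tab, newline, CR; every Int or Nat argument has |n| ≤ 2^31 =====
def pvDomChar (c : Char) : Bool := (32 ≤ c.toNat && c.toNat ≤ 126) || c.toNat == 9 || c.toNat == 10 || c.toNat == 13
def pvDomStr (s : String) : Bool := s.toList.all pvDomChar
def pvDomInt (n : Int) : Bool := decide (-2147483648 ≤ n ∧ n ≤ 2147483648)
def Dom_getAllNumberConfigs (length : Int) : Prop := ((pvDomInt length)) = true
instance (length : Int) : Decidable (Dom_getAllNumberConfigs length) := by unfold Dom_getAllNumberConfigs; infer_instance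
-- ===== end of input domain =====

-- B replaces A's stateful next-configuration machinery with a direct recursive
-- combination generator (objective: simpler); same return value, proved below.

-- ===== PORT A =====
-- lastOne: index of the last 1 (fold carries (latest, i))
def pvLastOne (config : List Int) : Int :=
  (config.foldl (fun (p : Int × Int) x => (if x = 1 then p.2 else p.1, p.2 + 1)) (0, 0)).1

-- list item assignment `l[i] = v`; in A's runs the index is always in range
def pvSet (l : List Int) (i v : Int) : List Int :=
  if 0 ≤ i then l.set i.toNat v else l

-- `while reverse[loopIndex] == v: loopIndex += 1` (fuel-guarded scan)
def pvScan (rev : List Int) (v : Int) : Nat → Int → Int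
  | 0, i => i
  | f+1, i => if PySem.List.pyGet? rev i = some v then pvScan rev v f (i+1) else i

def pvNextConfig (lastConfig : List Int) : List Int :=
  let reverse := lastConfig.reverse
  let li1 := pvScan reverse 1 (reverse.length + 1) 1
  let li2 := pvScan reverse 0 (reverse.length + 1) li1
  let realIndex : Int := (lastConfig.length : Int) - li2 - 1
  let newConfig := PySem.List.slice lastConfig (some 0) (some realIndex)
  let newConfig := newConfig ++ [0]
  let ones : Int := (lastConfig.count 1 : Int) - (newConfig.count 1 : Int)
  let newConfig := (PySem.List.pyRange 0 ones 1).foldl (fun acc _ => acc ++ [(1:Int)]) newConfig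
  let rest : Int := (lastConfig.length : Int) - (newConfig.length : Int)
  (PySem.List.pyRange 0 rest 1).foldl (fun acc _ => acc ++ [(0:Int)]) newConfig

-- inner `while startConfig[-1] == 0` loop of findConfigs (fuel-guarded)
def pvInner : Nat → List (List Int) → List Int → Int → List (List Int) × List Int
  | 0, cf, c, _ => (cf, c)
  | f+1, cf, c, lastPos =>
    if PySem.List.pyGet? c (-1) = some 0 then
      let c2 := pvSet (pvSet c lastPos 0) (lastPos + 1) 1
      pvInner f (cf ++ [c2]) c2 (lastPos + 1)
    else (cf, c)

-- outer `while startConfig != final` loop of findConfigs (fuel-guarded)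
def pvOuter (final : List Int) : Nat → List (List Int) → List Int → List (List Int)
  | 0, cf, _ => cf
  | f+1, cf, c =>
    if c = final then cf
    else
      let cf1 := cf ++ [c]
      let lastPos := pvLastOne c
      let p := pvInner (c.length + 1) cf1 c lastPos
      if p.2 ≠ final then
        let c3 := pvNextConfig p.2
        let cf3 := if c3 = final then p.1 ++ [c3] else p.1
        pvOuter final f cf3 c3
      else pvOuter final f p.1 p.2

def pvFindConfigs (startConfig final : List Int) : List (List Int) :=
  if startConfig = final then [startConfig]
  else pvOuter final (Nat.choose startConfig.length (startConfig.count 1) + 2) [] startConfig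

def getAllNumberConfigs (length : Int) : List (List Int) :=
  ((PySem.List.pyRange 0 (length + 1) 1).foldl (fun (st : Int × List (List Int)) _ =>
    let ones := st.1
    let config := (PySem.List.pyRange 0 ones 1).foldl (fun acc _ => acc ++ [(1:Int)]) []
    let cf := (PySem.List.pyRange 0 (length - ones) 1).foldl
        (fun (p : List Int × List Int) _ => (p.1 ++ [(0:Int)], p.2 ++ [(0:Int)])) (config, [])
    let final := (PySem.List.pyRange 0 ones 1).foldl (fun acc _ => acc ++ [(1:Int)]) cf.2
    (ones + 1, st.2 ++ pvFindConfigs cf.1 final)) ((0:Int), ([] : List (List Int)))).2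

-- ===== PORT B =====
-- _combos: all k-element combinations, lexicographic
def pvCombos : List Int → Nat → List (List Int)
  | _, 0 => [[]]
  | [], _+1 => []
  | x :: xs, k+1 => (pvCombos xs k).map (fun c => x :: c) ++ pvCombos xs (k+1)

def getAllNumberConfigs_alt (length : Int) : List (List Int) :=
  (PySem.List.pyRange 0 (length + 1) 1).foldl (fun total ones =>
    total ++ (pvCombos (PySem.List.pyRange 0 length 1) ones.toNat).map (fun pos =>
      (PySem.List.pyRange 0 length 1).map (fun i => if pos.contains i then (1:Int) else 0))) []

-- ===== PRECONDITION & SPEC =====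
def Spec_getAllNumberConfigs (length : Int) (out : List (List Int)) : Prop := out = getAllNumberConfigs_alt length
instance (length : Int) (out : List (List Int)) : Decidable (Spec_getAllNumberConfigs length out) := by unfold Spec_getAllNumberConfigs; infer_instance

-- ===== CLAIM (what is proved, stated in full; the proofs are below) =====
def Claim_equal_getAllNumberConfigs : Prop := ∀ (length : Int), Dom_getAllNumberConfigs length → Spec_getAllNumberConfigs length (getAllNumberConfigs length)

-- ===== LEMMAS AND PROOFS =====

def zer (a : Nat) : List Int := List.replicate a 0
def on1 (b : Nat) : List Int := List.replicate b 1

def psucc : List Int → Option (List Int)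
  | [] => none
  | x :: xs =>
    match psucc xs with
    | some ys => some (x :: ys)
    | none => if x = 1 ∧ xs.head? = some 0
        then some (0 :: (on1 (xs.count 1 + 1) ++ zer (xs.count 0 - 1)))
        else none

def Bin (c : List Int) : Prop := ∀ x ∈ c, x = 0 ∨ x = 1

theorem psucc_cons_some {c d : List Int} (x : Int) (h : psucc c = some d) :
    psucc (x :: c) = some (x :: d) := by
  simp [psucc, h]

theorem psucc_zer_on (a b : Nat) : psucc (zer a ++ on1 b) = none := by
  induction a with
  | zero =>
      simp only [zer, List.replicate, List.nil_append]
      induction b with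
      | zero => simp [psucc, on1]
      | succ b ih =>
          simp only [on1, List.replicate_succ]
          rw [psucc]
          simp only [on1] at ih
          rw [ih]
          rcases b with _ | b <;> simp [List.replicate_succ]
  | succ a ih =>
      simp only [zer, List.replicate_succ, List.cons_append]
      rw [psucc]
      simp only [zer] at ih
      rw [ih]
      simp

theorem psucc_none_shape {c : List Int} (hb : Bin c) (h : psucc c = none) :
    ∃ a b, c = zer a ++ on1 b := by
  induction c with
  | nil => exact ⟨0, 0, rfl⟩
  | cons x xs ih =>
      rw [psucc] at h
      rcases hp : psucc xs with _ | ys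
      · obtain ⟨a, b, hab⟩ := ih (fun y hy => hb y (by simp [hy])) hp
        rw [hp] at h
        simp only at h
        rcases hb x (by simp) with hx | hx
        · exact ⟨a + 1, b, by simp [hx, hab, zer, List.replicate_succ]⟩
        · -- x = 1: condition must fail, so xs.head? ≠ some 0, forcing a = 0
          subst hx hab
          split at h
          · exact absurd h (by simp)
          · rename_i hcond
            rcases a with _ | a
            · exact ⟨0, b + 1, by simp [zer, on1, List.replicate_succ]⟩
            · exfalso; apply hcond
              constructor
              · rfl
              · simp [zer, List.replicate_succ]
      · rw [hp] at h; simp at h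

theorem psucc_shape_some (q : List Int) (a b : Nat) :
    psucc (q ++ 1 :: (zer (a+1) ++ on1 b)) = some (q ++ 0 :: (on1 (b+1) ++ zer a)) := by
  induction q with
  | nil =>
      simp only [List.nil_append]
      rw [psucc, psucc_zer_on]
      have hh : (zer (a+1) ++ on1 b).head? = some 0 := by simp [zer, List.replicate_succ]
      have hc : (zer (a+1) ++ on1 b).count 1 = b := by
        simp [zer, on1, List.count_append, List.count_replicate]
      have hc0 : (zer (a+1) ++ on1 b).count 0 = a + 1 := by
        simp [zer, on1, List.count_append, List.count_replicate]
      rw [if_pos ⟨rfl, hh⟩, hc, hc0]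
      simp
  | cons x q ih =>
      simpa using psucc_cons_some x ih

theorem psucc_some_shape {c d : List Int} (hb : Bin c) (h : psucc c = some d) :
    ∃ q a b, c = q ++ 1 :: (zer (a+1) ++ on1 b) ∧ d = q ++ 0 :: (on1 (b+1) ++ zer a) := by
  induction c generalizing d with
  | nil => simp [psucc] at h
  | cons x xs ih =>
      rw [psucc] at h
      rcases hp : psucc xs with _ | ys
      · rw [hp] at h
        obtain ⟨a0, b0, hab⟩ := psucc_none_shape (fun y hy => hb y (by simp [hy])) hp
        by_cases hcond : x = 1 ∧ xs.head? = some 0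
        · rw [if_pos hcond] at h
          obtain ⟨hx1, hh⟩ := hcond
          subst hx1
          rcases a0 with _ | a0
          · rw [hab] at hh
            rcases b0 with _ | b0 <;> simp [zer, on1, List.replicate_succ] at hh
          · refine ⟨[], a0, b0, ?_, ?_⟩
            · simp [hab]
            · have hc : xs.count 1 = b0 := by
                simp [hab, zer, on1, List.count_append, List.count_replicate]
              have hc0 : xs.count 0 = a0 + 1 := by
                simp [hab, zer, on1, List.count_append, List.count_replicate]
              simp only [Option.some.injEq] at h
              rw [← h, hc, hc0]
              simp
        · rw [if_neg hcond] at h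
          simp at h
      · rw [hp] at h
        simp only [Option.some.injEq] at h
        obtain ⟨q, a, b, h1, h2⟩ := ih (fun y hy => hb y (by simp [hy])) hp
        exact ⟨x :: q, a, b, by simp [h1], by simp [← h, h2]⟩

theorem bin_append {q r : List Int} (hq : Bin q) (hr : Bin r) : Bin (q ++ r) := by
  intro x hx; rcases List.mem_append.1 hx with h | h
  exacts [hq x h, hr x h]

theorem bin_zer (a : Nat) : Bin (zer a) := by
  intro x hx; simp [zer] at hx; simp [hx]

theorem bin_on1 (b : Nat) : Bin (on1 b) := by
  intro x hx; simp [on1] at hx; simp [hx]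

theorem bin_of_append_left {q r : List Int} (h : Bin (q ++ r)) : Bin q :=
  fun x hx => h x (List.mem_append.2 (Or.inl hx))

def M : Nat → Nat → List (List Int)
  | 0, 0 => [[]]
  | 0, _+1 => []
  | n+1, 0 => (M n 0).map (fun c => 0 :: c)
  | n+1, k+1 => (M n k).map (fun c => 1 :: c) ++ (M n (k+1)).map (fun c => 0 :: c)

theorem M_zero (n : Nat) : M n 0 = [zer n] := by
  induction n with
  | zero => simp [M, zer]
  | succ n ih => simp [M, ih, zer, List.replicate_succ]

theorem M_big {n k : Nat} (h : n < k) : M n k = [] := by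
  induction n generalizing k with
  | zero => rcases k with _ | k; omega; simp [M]
  | succ n ih =>
      rcases k with _ | k
      · omega
      · simp [M, ih (by omega : n < k), ih (by omega : n < k + 1)]


theorem M_self (n : Nat) : M n n = [on1 n] := by
  induction n with
  | zero => simp [M, on1]
  | succ n ih =>
      have hb : M n (n+1) = [] := M_big (by omega)
      simp [M, ih, hb, on1, List.replicate_succ]

theorem M_length (n k : Nat) : (M n k).length = n.choose k := by
  induction n generalizing k with
  | zero => rcases k with _ | k <;> simp [M]
  | succ n ih =>
      rcases k with _ | k
      · simp [M, ih]
      · simp [M, ih, Nat.choose_succ_succ, Nat.add_comm]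

theorem M_ne_nil {n k : Nat} (h : k ≤ n) : M n k ≠ [] := by
  have hl := M_length n k
  intro hc
  rw [hc] at hl
  simp only [List.length_nil] at hl
  have hp := Nat.choose_pos h
  omega

theorem M_head {n k : Nat} (h : k ≤ n) : (M n k).head? = some (on1 k ++ zer (n - k)) := by
  induction n generalizing k with
  | zero =>
      interval_cases k
      simp [M, on1, zer]
  | succ n ih =>
      rcases k with _ | k
      · rw [M_zero]; simp [on1]
      · rcases Nat.lt_or_ge k n.succ with hk | hk
        · have hkn : k ≤ n := by omega
          have h1 := ih hkn
          have hne := M_ne_nil hkn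
          rw [M]
          rw [List.head?_append_of_ne_nil]
          · rw [List.head?_map, h1]
            simp [on1, List.replicate_succ, Nat.succ_sub hkn]
          · simpa using hne
        · have hkn : k + 1 = n + 1 := by omega
          rw [hkn, M_self]
          simp [on1, zer]

theorem M_last {n k : Nat} (h : k ≤ n) : (M n k).getLast? = some (zer (n - k) ++ on1 k) := by
  induction n generalizing k with
  | zero =>
      interval_cases k
      simp [M, on1, zer]
  | succ n ih =>
      rcases k with _ | k
      · rw [M_zero]; simp [zer, on1]
      · rcases Nat.lt_or_ge (k+1) (n+1) with hk | hk
        · have hkn : k + 1 ≤ n := by omega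
          have h1 := ih hkn
          have hne := M_ne_nil hkn
          rw [M, List.getLast?_append, List.getLast?_map, h1]
          have hnk : n + 1 - (k+1) = (n - (k+1)) + 1 := by omega
          rw [hnk]
          simp [zer, List.replicate_succ, Option.or]
        · have hkn : k + 1 = n + 1 := by omega
          rw [hkn, M_self]
          simp [on1, zer]

theorem M_bin {n k : Nat} {c : List Int} (hc : c ∈ M n k) : Bin c := by
  induction n generalizing k c with
  | zero =>
      rcases k with _ | k
      · simp [M] at hc; simp [hc, Bin]
      · simp [M] at hc
  | succ n ih =>
      rcases k with _ | k
      · simp [M] at hc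
        obtain ⟨d, hd, rfl⟩ := hc
        intro x hx
        rcases List.mem_cons.1 hx with h | h
        · simp [h]
        · exact ih hd x h
      · rw [M] at hc
        rcases List.mem_append.1 hc with h | h <;>
        · simp at h
          obtain ⟨d, hd, rfl⟩ := h
          intro x hx
          rcases List.mem_cons.1 hx with h | h
          · simp [h]
          · exact ih hd x h

theorem M_chain (n k : Nat) : List.IsChain (fun c d => psucc c = some d) (M n k) := by
  induction n generalizing k with
  | zero =>
      rcases k with _ | k
      · exact List.isChain_singleton _
      · simp [M]
  | succ n ih =>
      rcases k with _ | k
      · rw [M_zero]; exact List.isChain_singleton _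
      · rw [M]
        apply List.IsChain.append
        · rw [List.isChain_map]
          exact (ih k).imp (fun _ _ h => psucc_cons_some _ h)
        · rw [List.isChain_map]
          exact (ih (k+1)).imp (fun _ _ h => psucc_cons_some _ h)
        · intro x hx y hy
          rcases Nat.lt_or_ge n k with hnk | hnk
          · rw [M_big hnk] at hx; simp at hx
          · rcases Nat.lt_or_ge n (k+1) with hnk1 | hnk1
            · rw [M_big hnk1] at hy; simp at hy
            · rw [List.getLast?_map, M_last hnk] at hx
              rw [List.head?_map, M_head hnk1] at hy
              simp at hx hy
              subst hx hy
              have hs : n - k = (n - (k+1)) + 1 := by omega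
              rw [hs]
              have := psucc_shape_some [] (n - (k+1)) k
              simpa using this

def reach (fin : List Int) : Nat → List Int → Prop
  | 0, c => c = fin
  | m+1, c => ∃ d, psucc c = some d ∧ reach fin m d

def orbit : Nat → List Int → List (List Int)
  | 0, c => [c]
  | m+1, c => match psucc c with
    | some d => c :: orbit m d
    | none => [c]

theorem orbit_none {c : List Int} (h : psucc c = none) (m : Nat) : orbit m c = [c] := by
  cases m with
  | zero => rfl
  | succ m => simp [orbit, h]

theorem orbit_some {c d : List Int} (h : psucc c = some d) (m : Nat) :
    orbit (m+1) c = c :: orbit m d := by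
  simp [orbit, h]

theorem chain_orbit (l : List (List Int)) : ∀ (c : List Int),
    List.IsChain (fun c d => psucc c = some d) (c :: l) → orbit l.length c = c :: l := by
  induction l with
  | nil => intro c _; rfl
  | cons d t ih =>
      intro c h
      rw [List.isChain_cons_cons] at h
      rw [List.length_cons, orbit_some h.1, ih d h.2]

theorem chain_reach (l : List (List Int)) : ∀ (c fin : List Int),
    List.IsChain (fun c d => psucc c = some d) (c :: l) →
    (c :: l).getLast (by simp) = fin → reach fin l.length c := by
  induction l with
  | nil => intro c fin _ hl; simpa [reach] using hl
  | cons d t ih =>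
      intro c fin h hl
      rw [List.isChain_cons_cons] at h
      exact ⟨d, h.1, ih d fin h.2 (by simpa using hl)⟩
def slideL : List Int → Nat → List (List Int)
  | _, 0 => []
  | q, a+1 => (q ++ 0 :: 1 :: zer a) :: slideL (q ++ [0]) a

theorem foldl_append_const (L : List Int) (v : Int) (init : List Int) :
    L.foldl (fun acc _ => acc ++ [v]) init = init ++ List.replicate L.length v := by
  induction L generalizing init with
  | nil => simp
  | cons x xs ih => simp [List.foldl_cons, ih, List.replicate_succ]

theorem foldl_snd (L : List Int) : ∀ (p : Int × Int),
    (L.foldl (fun (p : Int × Int) x => (if x = 1 then p.2 else p.1, p.2 + 1)) p).2 = p.2 + L.length := by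
  induction L with
  | nil => simp
  | cons x xs ih => intro p; rw [List.foldl_cons, ih]; simp; omega

theorem foldl_zer_fst (a : Nat) : ∀ (p : Int × Int),
    ((zer a).foldl (fun (p : Int × Int) x => (if x = 1 then p.2 else p.1, p.2 + 1)) p).1 = p.1 := by
  induction a with
  | zero => simp [zer]
  | succ a ih =>
      intro p
      simp only [zer, List.replicate_succ, List.foldl_cons]
      simpa [zer] using ih (p.1, p.2 + 1)

theorem pvLastOne_eq (q : List Int) (a : Nat) : pvLastOne (q ++ 1 :: zer a) = (q.length : Int) := by
  unfold pvLastOne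
  rw [List.foldl_append, List.foldl_cons]
  have h2 := foldl_snd q (0, 0)
  set p := q.foldl (fun (p : Int × Int) x => (if x = 1 then p.2 else p.1, p.2 + 1)) (0, 0) with hp
  simp only [if_pos rfl]
  rw [foldl_zer_fst]
  simp at h2
  simp [h2]

theorem pySet_append (q : List Int) (x v : Int) (t : List Int) :
    pvSet (q ++ x :: t) (q.length : Int) v = q ++ v :: t := by
  unfold pvSet
  rw [if_pos (by positivity)]
  simp [List.set_append]

theorem pvInner_slides (a : Nat) : ∀ (q : List Int) (cf : List (List Int)) (F : Nat), a ≤ F →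
    pvInner F cf (q ++ 1 :: zer a) (q.length : Int) = (cf ++ slideL q a, q ++ zer a ++ [1]) := by
  induction a with
  | zero =>
      intro q cf F _
      have hg : PySem.List.pyGet? (q ++ 1 :: zer 0) (-1) = some 1 := by
        rw [PySem.List.pyGet?_neg_one]; simp [zer]
      cases F with
      | zero => simp [pvInner, slideL, zer]
      | succ F => rw [pvInner, if_neg (by simp [hg])]; simp [slideL, zer]
  | succ a ih =>
      intro q cf F hF
      obtain ⟨F, rfl⟩ : ∃ F', F = F' + 1 := ⟨F - 1, by omega⟩
      have hg : PySem.List.pyGet? (q ++ 1 :: zer (a+1)) (-1) = some 0 := by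
        rw [PySem.List.pyGet?_neg_one]
        rw [show q ++ 1 :: zer (a+1) = (q ++ 1 :: zer a) ++ [0] by
          simp [zer, List.replicate_succ']]
        rw [List.getLast?_concat]
      rw [pvInner, if_pos hg]
      have hs1 : pvSet (q ++ 1 :: zer (a+1)) (q.length : Int) 0 = q ++ 0 :: zer (a+1) :=
        pySet_append ..
      have hs2 : pvSet (q ++ 0 :: zer (a+1)) ((q.length : Int) + 1) 1 = q ++ 0 :: 1 :: zer a := by
        have := pySet_append (q ++ [0]) 0 1 (zer a)
        simpa [zer, List.replicate_succ] using this
      simp only [hs1, hs2]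
      have hq : q ++ 0 :: 1 :: zer a = (q ++ [0]) ++ 1 :: zer a := by simp
      have hl : (q.length : Int) + 1 = ((q ++ [0]).length : Int) := by simp
      rw [hq, hl, ih (q ++ [0]) (cf ++ [(q ++ [0]) ++ 1 :: zer a]) F (by omega)]
      rw [Prod.mk.injEq]
      constructor
      · simp [slideL, zer, List.replicate_succ]
      · simp [zer, List.replicate_succ]

theorem slide_decomp (a : Nat) : ∀ q : List Int,
    ((q ++ 1 :: zer a) :: slideL q a).dropLast ++ [q ++ zer a ++ [1]] = (q ++ 1 :: zer a) :: slideL q a := by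
  induction a with
  | zero => intro q; simp [slideL, zer]
  | succ a ih =>
      intro q
      rw [slideL]
      have h1 : q ++ 0 :: 1 :: zer a = (q ++ [0]) ++ 1 :: zer a := by simp
      have h2 : q ++ zer (a+1) ++ [1] = (q ++ [0]) ++ zer a ++ [1] := by
        simp [zer, List.replicate_succ]
      rw [h1, h2]
      have := ih (q ++ [0])
      rw [List.dropLast_cons_of_ne_nil (by simp)]
      rw [List.cons_append, this]

theorem orbit_slide (a : Nat) : ∀ (q : List Int) (m : Nat), a ≤ m →
    orbit m (q ++ 1 :: zer a) = ((q ++ 1 :: zer a) :: slideL q a).dropLast ++ orbit (m - a) (q ++ zer a ++ [1]) := by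
  induction a with
  | zero => intro q m _; simp [slideL, zer]
  | succ a ih =>
      intro q m hm
      obtain ⟨m, rfl⟩ : ∃ m', m = m' + 1 := ⟨m - 1, by omega⟩
      have hsucc : psucc (q ++ 1 :: zer (a+1)) = some (q ++ 0 :: 1 :: zer a) := by
        have := psucc_shape_some q a 0
        simpa [on1, zer, List.replicate_succ] using this
      rw [orbit_some hsucc]
      have h1 : q ++ 0 :: 1 :: zer a = (q ++ [0]) ++ 1 :: zer a := by simp
      rw [h1, ih (q ++ [0]) m (by omega)]
      conv_rhs => rw [slideL, List.dropLast_cons₂]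
      have h2 : q ++ zer (a+1) ++ [1] = (q ++ [0]) ++ zer a ++ [1] := by
        simp [zer, List.replicate_succ]
      have h3 : m + 1 - (a + 1) = m - a := by omega
      rw [h2, h3, h1]
      simp

theorem reach_slide (a : Nat) : ∀ (q : List Int) (m : Nat) (fin : List Int), psucc fin = none →
    reach fin m (q ++ 1 :: zer a) → a ≤ m ∧ reach fin (m - a) (q ++ zer a ++ [1]) := by
  induction a with
  | zero =>
      intro q m fin _ hr
      constructor; omega
      simpa [zer] using hr
  | succ a ih =>
      intro q m fin hfin hr
      have hsucc : psucc (q ++ 1 :: zer (a+1)) = some (q ++ 0 :: 1 :: zer a) := by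
        have := psucc_shape_some q a 0
        simpa [on1, zer, List.replicate_succ] using this
      cases m with
      | zero =>
          rw [reach] at hr
          rw [hr] at hsucc
          rw [hfin] at hsucc
          simp at hsucc
      | succ m =>
          obtain ⟨d, hd, hrd⟩ := hr
          rw [hsucc] at hd
          simp at hd
          subst hd
          have h1 : q ++ 0 :: 1 :: zer a = (q ++ [0]) ++ 1 :: zer a := by simp
          rw [h1] at hrd
          obtain ⟨hle, hre⟩ := ih (q ++ [0]) m fin hfin hrd
          constructor; omega
          have h2 : q ++ zer (a+1) ++ [1] = (q ++ [0]) ++ zer a ++ [1] := by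
            simp [zer, List.replicate_succ]
          rw [h2]
          have : m + 1 - (a+1) = m - a := by omega
          rw [this]
          exact hre

theorem pvScan_stop (rev : List Int) (v : Int) : ∀ (F i t : Nat), i ≤ t → t - i < F →
    (∀ j, i ≤ j → j < t → rev[j]? = some v) → rev[t]? ≠ some v →
    pvScan rev v F (i : Int) = (t : Int) := by
  intro F
  induction F with
  | zero => intro i t h1 h2; omega
  | succ F ih =>
      intro i t h1 h2 hin hout
      rcases Nat.eq_or_lt_of_le h1 with rfl | hlt
      · rw [pvScan, if_neg (by rw [PySem.List.pyGet?_natCast]; exact hout)]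
      · rw [pvScan, if_pos (by rw [PySem.List.pyGet?_natCast]; exact hin i le_rfl hlt)]
        have : (i : Int) + 1 = ((i + 1 : Nat) : Int) := by push_cast; ring
        rw [this]
        exact ih (i+1) t (by omega) (by omega) (fun j hj1 hj2 => hin j (by omega) hj2) hout

theorem pvNextConfig_eq (q : List Int) (a b : Nat) :
    pvNextConfig (q ++ 1 :: (zer (a+1) ++ on1 (b+1))) = q ++ 0 :: (on1 (b+2) ++ zer a) := by
  have hrev : (q ++ 1 :: (zer (a+1) ++ on1 (b+1))).reverse
      = on1 (b+1) ++ (zer (a+1) ++ 1 :: q.reverse) := by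
    simp [zer, on1, List.reverse_append, List.reverse_replicate]
  have hlen : (q ++ 1 :: (zer (a+1) ++ on1 (b+1))).length = q.length + a + b + 3 := by
    simp [zer, on1]; omega
  set c := q ++ 1 :: (zer (a+1) ++ on1 (b+1)) with hc
  set rev := on1 (b+1) ++ (zer (a+1) ++ 1 :: q.reverse) with hrevdef
  have hrevlen : rev.length = q.length + a + b + 3 := by simp [rev, zer, on1]; omega
  -- values in rev
  have hones : ∀ j, j < b + 1 → rev[j]? = some 1 := by
    intro j hj
    rw [hrevdef, List.getElem?_append_left (by simp [on1]; omega)]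
    simp [on1, List.getElem?_replicate, hj]
  have hz : ∀ j, b + 1 ≤ j → j < a + b + 2 → rev[j]? = some 0 := by
    intro j hj1 hj2
    rw [hrevdef, List.getElem?_append_right (by simp [on1]; omega)]
    rw [List.getElem?_append_left (by simp [on1, zer]; omega)]
    simp [on1, zer, List.getElem?_replicate]
    omega
  have hone2 : rev[a + b + 2]? = some 1 := by
    rw [hrevdef, List.getElem?_append_right (by simp [on1]; omega)]
    rw [List.getElem?_append_right (by simp [on1, zer]; omega)]
    simp [on1, zer]
  simp only [pvNextConfig]
  rw [hrev]
  have hscan1 : pvScan rev 1 (rev.length + 1) (1 : Int) = ((b+1 : Nat) : Int) := by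
    have h := pvScan_stop rev 1 (rev.length + 1) 1 (b+1) (by omega) (by omega)
      (fun j _ hj2 => hones j hj2) (by rw [hz (b+1) le_rfl (by omega)]; simp)
    simpa using h
  have hscan2 : pvScan rev 0 (rev.length + 1) ((b+1 : Nat) : Int) = ((a+b+2 : Nat) : Int) := by
    apply pvScan_stop rev 0 (rev.length + 1) (b+1) (a+b+2) (by omega) (by omega)
    · intro j hj1 hj2; exact hz j hj1 hj2
    · rw [hone2]; simp
  rw [hscan1, hscan2, hlen]
  have hreal : ((q.length + a + b + 3 : Nat) : Int) - ((a+b+2 : Nat) : Int) - 1 = (q.length : Int) := by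
    push_cast; ring
  rw [hreal]
  have hslice : PySem.List.slice c (some 0) (some (q.length : Int)) = q := by
    rw [PySem.List.slice_zero_start, PySem.List.slice_to_natCast, hc]
    exact List.take_left' rfl
  rw [hslice]
  have hcount : (c.count 1 : Int) - ((q ++ [0]).count 1 : Int) = ((b+2 : Nat) : Int) := by
    simp [hc, zer, on1, List.count_append, List.count_replicate]
    push_cast; ring
  rw [hcount]
  rw [foldl_append_const (PySem.List.pyRange 0 ((b+2 : Nat) : Int) 1) 1 (q ++ [0])]
  rw [PySem.List.length_pyRange_one]
  rw [show (((b+2 : Nat) : Int) - 0).toNat = b + 2 by push_cast; omega]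
  rw [foldl_append_const]
  rw [PySem.List.length_pyRange_one]
  have hrest : ((((q.length + a + b + 3 : Nat)) : Int) - ((q ++ [0] ++ List.replicate (b+2) 1).length : Int) - 0).toNat = a := by
    simp; omega
  rw [hrest]
  simp [on1, zer, List.replicate_succ]



-- ---- the outer loop follows the orbit ----
theorem bin_cons {x : Int} {c : List Int} (hx : x = 0 ∨ x = 1) (hc : Bin c) : Bin (x :: c) := by
  intro y hy
  rcases List.mem_cons.1 hy with h | h
  · subst h; exact hx
  · exact hc y h

theorem pvOuter_main (F : Nat) : ∀ (m : Nat) (c : List Int) (cf : List (List Int)) (fin : List Int),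
    m + 2 ≤ F → Bin c → psucc fin = none → reach fin m c → c ≠ fin →
    pvOuter fin F cf c = cf ++ orbit m c := by
  induction F with
  | zero => intro m c cf fin hF; omega
  | succ F ih =>
    intro m c cf fin hF hb hfin hr hne
    cases m with
    | zero => exact absurd hr hne
    | succ m' =>
      obtain ⟨d, hd, hrd⟩ := hr
      obtain ⟨q, a, b, hcq, hdq⟩ := psucc_some_shape hb hd
      have hbq : Bin q := bin_of_append_left (hcq ▸ hb)
      rw [orbit_some hd]
      simp only [pvOuter]
      rw [if_neg hne]
      cases b with
      | zero =>
        -- c ends in 0: the inner loop slides the last 1 to the end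
        have hc0 : c = q ++ 1 :: zer (a+1) := by simpa [on1] using hcq
        have hclen : c.length = q.length + a + 2 := by rw [hc0]; simp [zer]; omega
        have hlast : pvLastOne c = (q.length : Int) := by rw [hc0]; exact pvLastOne_eq q (a+1)
        have hinner : pvInner (c.length + 1) (cf ++ [c]) c (pvLastOne c)
            = (cf ++ [c] ++ slideL q (a+1), q ++ zer (a+1) ++ [1]) := by
          rw [hlast, hc0]
          exact pvInner_slides (a+1) q _ _ (by rw [← hc0, hclen]; omega)
        rw [hinner]
        dsimp only
        set e := q ++ zer (a+1) ++ [1] with hedef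
        obtain ⟨ha1, hre⟩ := reach_slide (a+1) q (m'+1) fin hfin
          (hc0 ▸ (⟨d, hd, hrd⟩ : reach fin (m'+1) c))
        have horb : orbit (m'+1) c = ((c :: slideL q (a+1)).dropLast) ++ orbit (m'+1-(a+1)) e := by
          conv_lhs => rw [hc0]
          rw [orbit_slide (a+1) q (m'+1) ha1, ← hc0]
        have hdec : (c :: slideL q (a+1)).dropLast ++ [e] = c :: slideL q (a+1) := by
          conv_lhs => rw [hc0]
          conv_rhs => rw [hc0]
          exact slide_decomp (a+1) q
        rw [← orbit_some hd, horb]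
        by_cases he : e = fin
        · rw [if_neg (show ¬ (e ≠ fin) from fun h => h he)]
          obtain ⟨F', rfl⟩ : ∃ F'', F = F'' + 1 := ⟨F - 1, by omega⟩
          rw [pvOuter, if_pos he]
          rw [orbit_none (show psucc e = none by rw [he]; exact hfin)]
          rw [hdec]
          simp
        · have hbe : Bin e := by
            apply bin_append
            apply bin_append hbq (bin_zer (a+1))
            intro x hx; simp at hx; simp [hx]
          rw [if_pos he]
          set m2 := m' + 1 - (a + 1) with hm2
          cases hm2' : m2 with
          | zero => rw [hm2'] at hre; exact absurd hre he
          | succ m3 =>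
            rw [hm2'] at hre
            obtain ⟨d2, hd2, hrd2⟩ := hre
            obtain ⟨q2, a2, b2, heq2, hdq2⟩ := psucc_some_shape hbe hd2
            have hb2pos : ∃ b2', b2 = b2' + 1 := by
              rcases b2 with _ | b2'
              · exfalso
                have h1 : e.getLast? = some 1 := by rw [hedef]; simp
                have h2 : e.getLast? = some 0 := by
                  rw [heq2,
                    show q2 ++ 1 :: (zer (a2+1) ++ on1 0) = (q2 ++ 1 :: zer a2) ++ [0] by
                      simp [zer, on1, List.replicate_succ']]
                  rw [List.getLast?_concat]
                rw [h1] at h2; simp at h2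
              · exact ⟨b2', rfl⟩
            obtain ⟨b2', rfl⟩ := hb2pos
            have hnext : pvNextConfig e = d2 := by
              rw [heq2, pvNextConfig_eq q2 a2 b2', hdq2]
            rw [hnext]
            have hbd2 : Bin d2 := by
              rw [hdq2]
              apply bin_append (bin_of_append_left (heq2 ▸ hbe))
              apply bin_cons (Or.inl rfl)
              exact bin_append (bin_on1 _) (bin_zer _)
            rw [orbit_some hd2]
            by_cases hd2fin : d2 = fin
            · rw [if_pos hd2fin]
              obtain ⟨F', rfl⟩ : ∃ F'', F = F'' + 1 := ⟨F - 1, by omega⟩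
              rw [pvOuter, if_pos hd2fin]
              rw [orbit_none (show psucc d2 = none by rw [hd2fin]; exact hfin)]
              rw [show ((c :: slideL q (a+1)).dropLast) ++ (e :: [d2])
                  = (((c :: slideL q (a+1)).dropLast ++ [e]) ++ [d2]) by simp]
              rw [hdec]
              simp
            · rw [if_neg hd2fin]
              rw [ih m3 d2 (cf ++ [c] ++ slideL q (a+1)) fin (by omega) hbd2 hfin hrd2 hd2fin]
              rw [show ((c :: slideL q (a+1)).dropLast) ++ (e :: orbit m3 d2)
                  = (((c :: slideL q (a+1)).dropLast ++ [e]) ++ orbit m3 d2) by simp]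
              rw [hdec]
              simp
      | succ b' =>
        -- c ends in 1: inner loop is a no-op, nextConfig jumps
        have hgl : PySem.List.pyGet? c (-1) = some 1 := by
          rw [PySem.List.pyGet?_neg_one, hcq]
          rw [show q ++ 1 :: (zer (a+1) ++ on1 (b'+1)) = (q ++ 1 :: (zer (a+1) ++ on1 b')) ++ [1] by
            simp [on1, List.replicate_succ']]
          rw [List.getLast?_concat]
        have hinner : pvInner (c.length + 1) (cf ++ [c]) c (pvLastOne c) = (cf ++ [c], c) := by
          rw [pvInner, if_neg (by simp [hgl])]
        rw [hinner]
        dsimp only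
        rw [if_pos hne]
        have hnext : pvNextConfig c = d := by
          rw [hcq, pvNextConfig_eq q a b', hdq]
        rw [hnext]
        by_cases hdfin : d = fin
        · rw [if_pos hdfin]
          obtain ⟨F', rfl⟩ : ∃ F'', F = F'' + 1 := ⟨F - 1, by omega⟩
          rw [pvOuter, if_pos hdfin]
          rw [orbit_none (show psucc d = none by rw [hdfin]; exact hfin)]
          simp
        · rw [if_neg hdfin]
          have hbd : Bin d := by
            rw [hdq]
            apply bin_append hbq
            apply bin_cons (Or.inl rfl)
            exact bin_append (bin_on1 _) (bin_zer _)
          rw [ih m' d (cf ++ [c]) fin (by omega) hbd hfin hrd hdfin]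
          simp

-- ---- findConfigs computes M n k ----
theorem zer_on_ne {n k : Nat} (h1 : 1 ≤ k) (h2 : k < n) :
    on1 k ++ zer (n - k) ≠ zer (n - k) ++ on1 k := by
  intro hc
  have hh : (on1 k ++ zer (n - k)).head? = ((zer (n - k) ++ on1 k) : List Int).head? := by rw [hc]
  obtain ⟨k', rfl⟩ : ∃ k', k = k' + 1 := ⟨k - 1, by omega⟩
  obtain ⟨j, hj⟩ : ∃ j, n - (k' + 1) = j + 1 := ⟨n - (k'+1) - 1, by omega⟩
  rw [hj] at hh
  simp [on1, zer, List.replicate_succ] at hh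

theorem pvFindConfigs_eq {n k : Nat} (h : k ≤ n) :
    pvFindConfigs (on1 k ++ zer (n - k)) (zer (n - k) ++ on1 k) = M n k := by
  rcases Nat.eq_or_lt_of_le h with rfl | hlt
  · unfold pvFindConfigs
    rw [if_pos (by simp [zer])]
    rw [M_self]
    simp [zer]
  · rcases Nat.eq_zero_or_pos k with rfl | hk1
    · unfold pvFindConfigs
      rw [if_pos (by simp [on1])]
      rw [M_zero]
      simp [on1]
    · -- 1 ≤ k < n
      have hne := zer_on_ne hk1 hlt
      unfold pvFindConfigs
      rw [if_neg hne]
      -- set up chain data for M n k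
      have hchain := M_chain n k
      have hMne : M n k ≠ [] := M_ne_nil h
      obtain ⟨hd0, tl, hM⟩ : ∃ hd0 tl, M n k = hd0 :: tl := by
        rcases hMM : M n k with _ | ⟨hd0, tl⟩
        · exact absurd hMM hMne
        · exact ⟨hd0, tl, rfl⟩
      have hhd : hd0 = on1 k ++ zer (n - k) := by
        have := M_head h
        rw [hM] at this
        simpa using this
      have hlast : (hd0 :: tl).getLast (by simp) = zer (n - k) ++ on1 k := by
        have h2 := M_last h
        rw [hM] at h2
        rw [List.getLast?_eq_some_getLast (show (hd0 :: tl) ≠ [] by simp)] at h2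
        exact Option.some.inj h2
      have hchain' : List.IsChain (fun c d => psucc c = some d) (hd0 :: tl) := hM ▸ hchain
      have hreach := chain_reach tl hd0 (zer (n - k) ++ on1 k) hchain' hlast
      have horbit := chain_orbit tl hd0 hchain'
      have hlen' : (on1 k ++ zer (n - k)).length = n := by simp [on1, zer]; omega
      have hcount' : (on1 k ++ zer (n - k)).count 1 = k := by
        simp [on1, zer, List.count_append, List.count_replicate]
      have hmlen : tl.length + 1 = Nat.choose n k := by
        have := M_length n k
        rw [hM] at this
        simpa using this
      have hbin : Bin hd0 := M_bin (by rw [hM]; exact List.mem_cons_self)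
      have hstart_ne : hd0 ≠ zer (n - k) ++ on1 k := hhd ▸ hne
      rw [hlen', hcount', ← hhd]
      rw [pvOuter_main (Nat.choose n k + 2) tl.length hd0 [] (zer (n - k) ++ on1 k)
        (by omega) hbin (psucc_zer_on _ _) hreach hstart_ne]
      rw [horbit, ← hM]
      simp


-- ---- A's top level ----
theorem A_eq (n : Nat) :
    getAllNumberConfigs (n : Int) = ((List.range (n+1)).map (fun k => M n k)).flatten := by
  have key : ∀ t : Nat, t ≤ n + 1 →
      ((PySem.List.pyRange 0 (t : Int) 1).foldl (fun (st : Int × List (List Int)) _ =>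
        let ones := st.1
        let config := (PySem.List.pyRange 0 ones 1).foldl (fun acc _ => acc ++ [(1:Int)]) []
        let cf := (PySem.List.pyRange 0 ((n : Int) - ones) 1).foldl
            (fun (p : List Int × List Int) _ => (p.1 ++ [(0:Int)], p.2 ++ [(0:Int)])) (config, [])
        let final := (PySem.List.pyRange 0 ones 1).foldl (fun acc _ => acc ++ [(1:Int)]) cf.2
        (ones + 1, st.2 ++ pvFindConfigs cf.1 final)) ((0:Int), ([] : List (List Int))))
      = ((t : Int), ((List.range t).map (fun k => M n k)).flatten) := by
    intro t
    induction t with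
    | zero =>
        intro _
        rw [PySem.List.pyRange_one_eq_nil (by omega)]
        simp
    | succ t iht =>
        intro ht
        have hcast : ((t + 1 : Nat) : Int) = (t : Int) + 1 := by push_cast; ring
        rw [hcast, PySem.List.pyRange_one_succ_right (by omega), List.foldl_append,
          iht (by omega)]
        simp only [List.foldl_cons, List.foldl_nil]
        -- evaluate one iteration at ones = t
        have hconfig : (PySem.List.pyRange 0 (t : Int) 1).foldl (fun acc _ => acc ++ [(1:Int)]) []
            = on1 t := by
          rw [foldl_append_const, PySem.List.length_pyRange_one]
          simp [on1]
        have hpair : (PySem.List.pyRange 0 ((n : Int) - (t : Int)) 1).foldl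
            (fun (p : List Int × List Int) _ => (p.1 ++ [(0:Int)], p.2 ++ [(0:Int)])) (on1 t, [])
            = (on1 t ++ zer (n - t), zer (n - t)) := by
          rw [PySem.List.foldl_prod_mk (f := fun acc (_ : Int) => acc ++ [(0:Int)])
            (g := fun acc (_ : Int) => acc ++ [(0:Int)])]
          rw [foldl_append_const, foldl_append_const, PySem.List.length_pyRange_one]
          have : (((n : Int) - (t : Int)) - 0).toNat = n - t := by omega
          rw [this]
          simp [zer]
        have hfinal : (PySem.List.pyRange 0 (t : Int) 1).foldl (fun acc _ => acc ++ [(1:Int)])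
            (zer (n - t)) = zer (n - t) ++ on1 t := by
          rw [foldl_append_const, PySem.List.length_pyRange_one]
          simp [on1]
        simp only [hconfig, hpair, hfinal]
        rw [pvFindConfigs_eq (show t ≤ n by omega)]
        rw [List.range_succ]
        simp
  have htop : ((n + 1 : Nat) : Int) = (n : Int) + 1 := by push_cast; ring
  unfold getAllNumberConfigs
  rw [← htop, key (n+1) le_rfl]

-- ---- B's side ----
theorem pvCombos_subset {ns : List Int} : ∀ {k : Nat} {p : List Int}, p ∈ pvCombos ns k →
    ∀ y ∈ p, y ∈ ns := by
  induction ns with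
  | nil =>
      intro k p hp
      rcases k with _ | k
      · simp [pvCombos] at hp; simp [hp]
      · simp [pvCombos] at hp
  | cons x xs ih =>
      intro k p hp
      rcases k with _ | k
      · simp [pvCombos] at hp; simp [hp]
      · rw [pvCombos] at hp
        rcases List.mem_append.1 hp with h | h
        · simp at h
          obtain ⟨p', hp', rfl⟩ := h
          intro y hy
          rcases List.mem_cons.1 hy with rfl | hy'
          · simp
          · exact List.mem_cons_of_mem x (ih hp' y hy')
        · exact fun y hy => List.mem_cons_of_mem x (ih h y hy)


theorem pvCombos_build (ns : List Int) : ∀ (k : Nat), ns.Nodup →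
    (pvCombos ns k).map (fun pos => ns.map (fun i => if pos.contains i then (1:Int) else 0)) = M ns.length k := by
  induction ns with
  | nil =>
      intro k _
      rcases k with _ | k <;> simp [pvCombos, M]
  | cons x xs ih =>
      intro k hn
      have hx : x ∉ xs := (List.nodup_cons.1 hn).1
      have hxs : xs.Nodup := (List.nodup_cons.1 hn).2
      rcases k with _ | k
      · -- k = 0: single empty combination → all-zeros config
        simp only [pvCombos, List.map_cons, List.map_map, List.length_cons]
        rw [M_zero]
        simp [zer, List.map_const', List.replicate_succ]
      · rw [pvCombos, List.map_append, List.length_cons, M]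
        congr 1
        · -- combinations containing x
          rw [List.map_map, ← ih k hxs, List.map_map]
          apply List.map_congr_left
          intro p hp
          have hsub := pvCombos_subset hp
          simp only [Function.comp]
          rw [List.map_cons]
          have h1 : (if (x :: p).contains x then (1:Int) else 0) = 1 := by simp
          rw [h1]
          congr 1
          apply List.map_congr_left
          intro i hi
          have hix : i ≠ x := fun hc => hx (hc ▸ hi)
          simp [List.contains_cons, hix]
        · -- combinations not containing x
          rw [← ih (k+1) hxs, List.map_map]
          apply List.map_congr_left
          intro p hp
          have hsub := pvCombos_subset hp
          have hxp : x ∉ p := fun hc => hx (hsub x hc)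
          simp only [Function.comp]
          rw [List.map_cons]
          have h1 : (if p.contains x then (1:Int) else 0) = 0 := by simp [hxp]
          rw [h1]


theorem B_eq (n : Nat) :
    getAllNumberConfigs_alt (n : Int) = ((List.range (n+1)).map (fun k => M n k)).flatten := by
  have hnodup : (PySem.List.pyRange 0 (n : Int) 1).Nodup := PySem.List.nodup_pyRange_one ..
  have hlen : (PySem.List.pyRange 0 (n : Int) 1).length = n := by
    rw [PySem.List.length_pyRange_one]; simp
  have key : ∀ t : Nat, t ≤ n + 1 →
      ((PySem.List.pyRange 0 (t : Int) 1).foldl (fun total ones =>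
        total ++ (pvCombos (PySem.List.pyRange 0 (n : Int) 1) ones.toNat).map (fun pos =>
          (PySem.List.pyRange 0 (n : Int) 1).map (fun i => if pos.contains i then (1:Int) else 0))) [])
      = ((List.range t).map (fun k => M n k)).flatten := by
    intro t
    induction t with
    | zero =>
        intro _
        rw [show PySem.List.pyRange 0 ((0:Nat) : Int) 1 = [] from
          PySem.List.pyRange_one_eq_nil (by omega)]
        simp
    | succ t iht =>
        intro ht
        have hcast : ((t + 1 : Nat) : Int) = (t : Int) + 1 := by push_cast; ring
        rw [hcast, show PySem.List.pyRange 0 ((t : Int) + 1) 1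
              = PySem.List.pyRange 0 (t : Int) 1 ++ [(t : Int)] from
            PySem.List.pyRange_one_succ_right (by omega), List.foldl_append,
          iht (by omega)]
        simp only [List.foldl_cons, List.foldl_nil]
        rw [show ((t : Int)).toNat = t by omega]
        rw [show (pvCombos (PySem.List.pyRange 0 (n : Int) 1) t).map (fun pos =>
            (PySem.List.pyRange 0 (n : Int) 1).map (fun i => if pos.contains i then (1:Int) else 0))
            = M n t by rw [pvCombos_build _ t hnodup, hlen]]
        rw [List.range_succ]
        simp
  have htop : ((n + 1 : Nat) : Int) = (n : Int) + 1 := by push_cast; ring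
  unfold getAllNumberConfigs_alt
  rw [← htop, key (n+1) le_rfl]

-- ===== VERDICT (by name: the statement is the Claim_ definition above) =====
theorem getAllNumberConfigs_spec : Claim_equal_getAllNumberConfigs := by
  intro length _
  unfold Spec_getAllNumberConfigs
  cases length with
  | ofNat n => exact (A_eq n).trans (B_eq n).symm
  | negSucc n =>
      have h : (Int.negSucc n) + 1 ≤ 0 := by omega
      unfold getAllNumberConfigs getAllNumberConfigs_alt
      rw [PySem.List.pyRange_one_eq_nil (by omega)]
      simp
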